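-- pv_equiv track=rewrite | github.com/baditaflorin/ServerClaw | scripts/neko_tool.py | next_available_port
-- ===== SOURCE A (Python) =====
-- from typing import Any
--
-- BASE_TCP_PORT: int = 8080
--
-- def _used_tcp_ports(instances: dict[str, dict[str, Any]]) -> set[int]:
--     return {int(cfg["port"]) for cfg in instances.values()}
--
-- def next_available_port(instances: dict[str, dict[str, Any]], override: int | None = None) -> int:
--     """Return the next available TCP port, optionally honouring an override."""
--     if override is not None:
--         return override
--     used = _used_tcp_ports(instances)
--     port = BASE_TCP_PORT
--     while port in used:
--         port += 1
--     return port
-- ===== SOURCE B (Python) =====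
-- from typing import Any
--
-- BASE_TCP_PORT: int = 8080
--
-- def next_available_port(instances: dict[str, dict[str, Any]], override: int | None = None) -> int:
--     """Return the next available TCP port, optionally honouring an override."""
--     if override is not None:
--         return override
--     ports = sorted(int(cfg["port"]) for cfg in instances.values())
--     candidate = BASE_TCP_PORT
--     for p in ports:
--         if p < candidate:
--             continue
--         if p == candidate:
--             candidate += 1
--         else:
--             break
--     return candidate
-- ===== Notes on version B (the rewrite author's own statement) =====
-- stated objective: alternative
-- what changed: Replaced the set-membership upward probe loop with a sort of the used ports followed by a single-pass gap walk (skip below candidate, advance on equality, break on the first gap).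
import Mathlib
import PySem

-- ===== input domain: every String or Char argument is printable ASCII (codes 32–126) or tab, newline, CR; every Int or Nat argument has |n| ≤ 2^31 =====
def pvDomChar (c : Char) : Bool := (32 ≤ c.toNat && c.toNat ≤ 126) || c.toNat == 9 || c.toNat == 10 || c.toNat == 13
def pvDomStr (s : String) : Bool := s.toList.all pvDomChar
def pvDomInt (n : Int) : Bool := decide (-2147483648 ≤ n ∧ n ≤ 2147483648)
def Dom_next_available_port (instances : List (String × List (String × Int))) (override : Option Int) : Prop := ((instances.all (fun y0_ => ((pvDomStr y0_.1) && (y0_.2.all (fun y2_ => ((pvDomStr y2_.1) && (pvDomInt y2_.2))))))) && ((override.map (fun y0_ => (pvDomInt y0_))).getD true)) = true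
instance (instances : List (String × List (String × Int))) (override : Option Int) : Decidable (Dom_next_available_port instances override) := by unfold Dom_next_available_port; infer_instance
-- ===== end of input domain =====

-- B replaces A's set-membership upward probe with a sort of the used ports and a single-pass gap walk (alternative decomposition, not claimed faster).

-- ===== PORT A =====
-- _used_tcp_ports: the values() of each instance config looked up at "port" (int() on an int is the identity), collected as a set
def pvPorts (instances : List (String × List (String × Int))) : List Int :=
  instances.map (fun kv => (PySem.Dict.mk kv.2).getD "port" 0)  -- getD total form: Pre_ guarantees the key is present (else Python raises KeyError)

-- the 'while port in used: port += 1' loop; fuel (used.length + 1) strictly exceeds the number of iterations, which is ≤ |used| since used has no duplicates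
def pvScanA (used : PySem.Set Int) (port : Int) : Nat → Int
  | 0 => port
  | f + 1 => if PySem.Set.contains used port then pvScanA used (port + 1) f else port

def next_available_port (instances : List (String × List (String × Int))) (override : Option Int) : Int :=
  match override with
  | some o => o
  | none =>
    let used := PySem.Set.ofList (pvPorts instances)
    pvScanA used 8080 (used.length + 1)

-- ===== PORT B =====
-- the for-loop over the sorted used ports: skip below candidate, advance on equality, break on the first gap
def pvWalkB (ports : List Int) (cand : Int) : Int :=
  match ports with
  | [] => cand
  | p :: rest =>
    if p < cand then pvWalkB rest cand
    else if p = cand then pvWalkB rest (cand + 1)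
    else cand

def next_available_port_alt (instances : List (String × List (String × Int))) (override : Option Int) : Int :=
  match override with
  | some o => o
  | none =>
    pvWalkB (PySem.List.sorted (instances.map (fun kv => (PySem.Dict.mk kv.2).getD "port" 0)) (fun x => x) false) 8080

-- ===== PRECONDITION & SPEC =====
-- Pre_ excludes exactly the inputs where override is absent and some instance config lacks the key "port", on which Python A raises KeyError
def Pre_next_available_port (instances : List (String × List (String × Int))) (override : Option Int) : Prop :=
  override = none → ∀ kv ∈ instances, (PySem.Dict.mk kv.2).contains "port" = true
instance (instances : List (String × List (String × Int))) (override : Option Int) : Decidable (Pre_next_available_port instances override) := by unfold Pre_next_available_port; infer_instance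
def pvWitness_next_available_port : (List (String × List (String × Int))) × Option Int :=
  ([("neko1", [("port", 8080)]), ("neko2", [("port", 8081)])], none)

def Spec_next_available_port (instances : List (String × List (String × Int))) (override : Option Int) (out : Int) : Prop := out = next_available_port_alt instances override
instance (instances : List (String × List (String × Int))) (override : Option Int) (out : Int) : Decidable (Spec_next_available_port instances override out) := by unfold Spec_next_available_port; infer_instance

-- ===== CLAIM (what is proved, stated in full; the proofs are below) =====
def Claim_equal_next_available_port : Prop := ∀ (instances : List (String × List (String × Int))) (override : Option Int), Dom_next_available_port instances override → Pre_next_available_port instances override → Spec_next_available_port instances override (next_available_port instances override)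

-- ===== LEMMAS AND PROOFS =====

-- consuming a present element strictly shrinks the tail-filter
lemma pvFilter_aux (t : List Int) (port : Int) :
    (t.filter (fun x => decide (port + 1 ≤ x))).length ≤ (t.filter (fun x => decide (port ≤ x))).length :=
  (List.monotone_filter_right t (by intro x hx; simp at hx ⊢; omega)).length_le

lemma pvFilter_lt (used : List Int) (port : Int) (h : port ∈ used) :
    (used.filter (fun x => decide (port + 1 ≤ x))).length < (used.filter (fun x => decide (port ≤ x))).length := by
  induction used with
  | nil => simp at h
  | cons a t ih =>
    simp only [List.filter_cons]
    rcases List.mem_cons.mp h with rfl | ha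
    · have hle := pvFilter_aux t port
      simp only [decide_eq_true_eq]
      rw [if_neg (by omega), if_pos (by omega)]
      simp only [List.length_cons]; omega
    · have hlt := ih ha
      by_cases hc1 : port + 1 ≤ a
      · rw [if_pos (by simpa using hc1), if_pos (by simp; omega)]
        simp only [List.length_cons]; omega
      · by_cases hc2 : port ≤ a
        · rw [if_neg (by simpa using hc1), if_pos (by simpa using hc2)]
          simp only [List.length_cons]; omega
        · rw [if_neg (by simpa using hc1), if_neg (by simpa using hc2)]
          exact hlt

-- the while-loop returns the least port ≥ start that is not used, given enough fuel
lemma pvScanA_spec (used : PySem.Set Int) (port : Int) (fuel : Nat)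
    (hf : (used.filter (fun x => decide (port ≤ x))).length < fuel) :
    port ≤ pvScanA used port fuel ∧ pvScanA used port fuel ∉ used ∧
      ∀ q, port ≤ q → q < pvScanA used port fuel → q ∈ used := by
  induction fuel generalizing port with
  | zero => omega
  | succ f ih =>
    by_cases hmem : port ∈ used
    · have heq : pvScanA used port (f + 1) = pvScanA used (port + 1) f := by
        simp [pvScanA, PySem.Set.contains, hmem]
      have hf' : (used.filter (fun x => decide (port + 1 ≤ x))).length < f := by
        have := pvFilter_lt used port hmem; omega
      obtain ⟨h1, h2, h3⟩ := ih (port + 1) hf'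
      rw [heq]
      refine ⟨by omega, h2, ?_⟩
      intro q hq1 hq2
      rcases eq_or_lt_of_le hq1 with rfl | hlt
      · exact hmem
      · exact h3 q (by omega) hq2
    · have heq : pvScanA used port (f + 1) = port := by
        simp [pvScanA, PySem.Set.contains, hmem]
      rw [heq]
      exact ⟨le_refl _, hmem, by intro q h1 h2; omega⟩

-- the sorted gap walk returns the least value ≥ cand absent from the list
lemma pvWalkB_spec (ports : List Int) (cand : Int) (hs : ports.Pairwise (· ≤ ·)) :
    cand ≤ pvWalkB ports cand ∧ pvWalkB ports cand ∉ ports ∧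
      ∀ q, cand ≤ q → q < pvWalkB ports cand → q ∈ ports := by
  induction ports generalizing cand with
  | nil => simp [pvWalkB]
  | cons p rest ih =>
    obtain ⟨hp, ht⟩ := List.pairwise_cons.mp hs
    by_cases h1 : p < cand
    · obtain ⟨a1, a2, a3⟩ := ih cand ht
      refine ⟨by simpa [pvWalkB, h1] using a1, ?_, ?_⟩
      · simp only [pvWalkB, if_pos h1, List.mem_cons]
        rintro (rfl | hr)
        · omega
        · exact a2 hr
      · intro q hq1 hq2
        simp only [pvWalkB, if_pos h1] at hq2
        exact List.mem_cons_of_mem _ (a3 q hq1 hq2)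
    · by_cases h2 : p = cand
      · obtain ⟨a1, a2, a3⟩ := ih (cand + 1) ht
        refine ⟨by simp [pvWalkB, h2]; omega, ?_, ?_⟩
        · simp only [pvWalkB, if_neg h1, if_pos h2, List.mem_cons]
          rintro (rfl | hr)
          · omega
          · exact a2 hr
        · intro q hq1 hq2
          simp only [pvWalkB, if_neg h1, if_pos h2] at hq2 ⊢
          rcases eq_or_lt_of_le hq1 with rfl | hlt
          · exact List.mem_cons.mpr (Or.inl h2.symm)
          · exact List.mem_cons_of_mem _ (a3 q (by omega) hq2)
      · refine ⟨by simp [pvWalkB, h1, h2], ?_, ?_⟩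
        · simp only [pvWalkB, if_neg h1, if_neg h2, List.mem_cons]
          rintro (rfl | hr)
          · exact h2 rfl
          · exact absurd (hp _ hr) (by omega)
        · intro q hq1 hq2
          simp [pvWalkB, h1, h2] at hq2; omega

-- the least-free-port characterisation is unique
lemma pvUniq {P : Int → Prop} {base r1 r2 : Int}
    (h1 : base ≤ r1 ∧ ¬ P r1 ∧ ∀ q, base ≤ q → q < r1 → P q)
    (h2 : base ≤ r2 ∧ ¬ P r2 ∧ ∀ q, base ≤ q → q < r2 → P q) : r1 = r2 := by
  rcases lt_trichotomy r1 r2 with h | h | h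
  · exact absurd (h2.2.2 r1 h1.1 h) h1.2.1
  · exact h
  · exact absurd (h1.2.2 r2 h2.1 h) h2.2.1

-- ===== VERDICT (by name: the statement is the Claim_ definition above) =====
theorem next_available_port_spec : Claim_equal_next_available_port := by
  intro instances override _ _
  unfold Spec_next_available_port next_available_port next_available_port_alt
  match override with
  | some o => rfl
  | none =>
    simp only
    set l := pvPorts instances with hl
    have hA := pvScanA_spec (PySem.Set.ofList l) 8080 ((PySem.Set.ofList l).length + 1)
      (by have := List.length_filter_le (fun x => decide ((8080:Int) ≤ x)) (PySem.Set.ofList l); omega)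
    have hB := pvWalkB_spec (PySem.List.sorted l (fun x => x) false) 8080
      (PySem.List.sorted_pairwise l (fun x => x))
    -- same membership predicate on both sides
    have hmem : ∀ q : Int, q ∈ PySem.Set.ofList l ↔ q ∈ PySem.List.sorted l (fun x => x) false := by
      intro q
      rw [PySem.Set.mem_ofList, PySem.List.mem_sorted]
    refine pvUniq (P := fun q => q ∈ PySem.List.sorted l (fun x => x) false) ?_ hB
    obtain ⟨a1, a2, a3⟩ := hA
    exact ⟨a1, fun hc => a2 ((hmem _).mpr hc), fun q hq1 hq2 => (hmem _).mp (a3 q hq1 hq2)⟩
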